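-- pv_equiv track=rewrite | github.com/Sunwoo0110/Algorithm | 프로그래머스/1/42576. 완주하지 못한 선수/완주하지 못한 선수.py | solution
-- ===== SOURCE A (Python) =====
-- from collections import defaultdict
--
-- def solution(participant, completion):
--     answer = ''
--
--     part_dict = defaultdict(int)
--     comp_dict = defaultdict(int)
--
--     for part in participant:
--         part_dict[part] += 1
--
--     for comp in completion:
--         comp_dict[comp] += 1
--
--     for k, v in part_dict.items():
--         if k not in comp_dict.keys() or v != comp_dict[k]:
--             return k
--
--     return answer
-- ===== SOURCE B (Python) =====
-- def solution(participant, completion):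
--     # Partition-and-discard: peel off one distinct name at a time, comparing
--     # the sizes of its occurrence groups, recursing on the shrinking remainders.
--     while participant:
--         p = participant[0]
--         mine = [x for x in participant if x == p]
--         rest = [x for x in participant if x != p]
--         cmine = [x for x in completion if x == p]
--         crest = [x for x in completion if x != p]
--         if len(mine) != len(cmine):
--             return p
--         participant, completion = rest, crest
--     return ''
-- ===== Notes on version B (the rewrite author's own statement) =====
-- stated objective: alternative
-- what changed: Replaces the two count-dict passes plus dict-items scan by a partition-and-discard loop: repeatedly split both lists on the first remaining participant name, compare the two occurrence-group sizes, and continue on the remainders with that name removed.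
import Mathlib
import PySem

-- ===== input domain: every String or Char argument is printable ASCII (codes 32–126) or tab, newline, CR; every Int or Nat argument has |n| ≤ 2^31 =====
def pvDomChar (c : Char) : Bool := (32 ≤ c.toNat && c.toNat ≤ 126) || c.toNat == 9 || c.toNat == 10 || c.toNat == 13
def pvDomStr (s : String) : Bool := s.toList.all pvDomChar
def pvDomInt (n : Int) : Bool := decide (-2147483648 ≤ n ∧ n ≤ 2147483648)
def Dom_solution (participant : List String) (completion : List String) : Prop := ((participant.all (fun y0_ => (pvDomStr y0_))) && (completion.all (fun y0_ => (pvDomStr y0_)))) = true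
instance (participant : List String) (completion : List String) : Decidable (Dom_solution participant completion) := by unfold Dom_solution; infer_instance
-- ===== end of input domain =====

-- B replaces A's two count dicts by a partition-and-discard recursion over the
-- distinct participant names (alternative algorithm; a timing run measured it faster on its duplicate-heavy inputs).


-- ===== PORT A =====
-- 'for k, v in part_dict.items(): if k not in comp_dict.keys() or v != comp_dict[k]: return k'
def solutionLoopA (comp : PySem.Dict String Int) (answer : String) : List (String × Int) → String
  | [] => answer
  | (k, v) :: rest =>
    if !(comp.contains k) || v ≠ comp.getD k 0 then k else solutionLoopA comp answer rest

def solution (participant : List String) (completion : List String) : String :=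
  let answer := ""
  let part_dict := participant.foldl (fun d part => d.modify part 0 (· + 1)) PySem.Dict.empty
  let comp_dict := completion.foldl (fun d comp => d.modify comp 0 (· + 1)) PySem.Dict.empty
  solutionLoopA comp_dict answer part_dict.items

-- ===== PORT B =====
-- partition both lists on the first remaining name, compare group sizes, recurse
def solution_alt (participant : List String) (completion : List String) : String :=
  match participant with
  | [] => ""
  | p :: t =>
    let mine := (p :: t).filter (fun x => x == p)
    let rest := (p :: t).filter (fun x => x != p)
    let cmine := completion.filter (fun x => x == p)
    let crest := completion.filter (fun x => x != p)
    if mine.length ≠ cmine.length then p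
    else solution_alt rest crest
termination_by participant.length
decreasing_by
  simp only [List.filter_cons, bne_self_eq_false, List.length_cons]
  exact Nat.lt_succ_of_le (List.length_filter_le _ _)

-- ===== PRECONDITION & SPEC =====
def Spec_solution (participant : List String) (completion : List String) (out : String) : Prop := out = solution_alt participant completion
instance (participant : List String) (completion : List String) (out : String) : Decidable (Spec_solution participant completion out) := by unfold Spec_solution; infer_instance

-- ===== CLAIM (what is proved, stated in full; the proofs are below) =====
def Claim_equal_solution : Prop := ∀ (participant : List String) (completion : List String), Dom_solution participant completion → Spec_solution participant completion (solution participant completion)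

-- ===== LEMMAS AND PROOFS =====

-- both sides are characterised as:  first x in participant with P.count x ≠ C.count x, else ""
def pvQ (P C : List String) (x : String) : Bool := decide (P.count x ≠ C.count x)

theorem pvFind?_congr_mem {α : Type} (p q : α → Bool) (l : List α)
    (h : ∀ x ∈ l, p x = q x) : l.find? p = l.find? q := by
  induction l with
  | nil => rfl
  | cons x xs ih =>
    simp only [List.find?_cons, h x (List.mem_cons_self)]
    cases q x with
    | true => rfl
    | false => exact ih fun y hy => h y (List.mem_cons_of_mem _ hy)

theorem pvFind?_discard {α : Type} [BEq α] [LawfulBEq α] (q : α → Bool) (s : List α) (x : α)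
    (hx : q x = false) : (PySem.Set.discard s x).find? q = s.find? q := by
  induction s with
  | nil => rfl
  | cons y ys ih =>
    simp only [PySem.Set.discard, List.filter_cons] at ih ⊢
    by_cases hyx : y = x
    · subst hyx
      rw [if_neg (by simp), ih, List.find?_cons_of_neg (by simp [hx])]
    · rw [if_pos (by simp [hyx])]
      cases hq : q y with
      | false =>
        rw [List.find?_cons_of_neg (by simp [hq]), List.find?_cons_of_neg (by simp [hq]), ih]
      | true =>
        rw [List.find?_cons_of_pos hq, List.find?_cons_of_pos hq]

theorem pvFind?_ofList {α : Type} [BEq α] [LawfulBEq α] (q : α → Bool) (xs : List α) :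
    (PySem.Set.ofList xs).find? q = xs.find? q := by
  induction xs with
  | nil => rfl
  | cons x xs ih =>
    rw [PySem.Set.ofList_cons]
    cases hq : q x with
    | true => rw [List.find?_cons_of_pos hq, List.find?_cons_of_pos hq]
    | false =>
      rw [List.find?_cons_of_neg (by simp [hq]), List.find?_cons_of_neg (by simp [hq]),
        pvFind?_discard q _ x hq, ih]

theorem pvLoopA_eq_find (comp : PySem.Dict String Int) (l : List (String × Int)) :
    solutionLoopA comp "" l =
      ((l.find? (fun kv => !(comp.contains kv.1) || decide (kv.2 ≠ comp.getD kv.1 0))).map Prod.fst).getD "" := by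
  induction l with
  | nil => rfl
  | cons kv rest ih =>
    obtain ⟨k, v⟩ := kv
    simp only [solutionLoopA]
    by_cases h : (!comp.contains k || decide (v ≠ comp.getD k 0)) = true
    · rw [if_pos h]
      simp only [List.find?_cons, h, Option.map_some, Option.getD_some]
    · have hb : (!comp.contains k || decide (v ≠ comp.getD k 0)) = false := by
        simpa using h
      rw [if_neg h]
      simp only [List.find?_cons, hb]
      exact ih

-- A's dict-items predicate agrees with pvQ on every element of participant
theorem pvPred_agree (P C : List String) (k : String) (hk : k ∈ P) :
    ((fun kv : String × Int => !((PySem.Dict.counter C).contains kv.1) || decide (kv.2 ≠ (PySem.Dict.counter C).getD kv.1 0)) ∘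
      (fun k => (k, (P.count k : Int)))) k
      = pvQ P C k := by
  simp only [Function.comp_apply, PySem.Dict.contains_counter, PySem.Dict.getD_counter, pvQ]
  by_cases hc : C.contains k = true
  · rw [show (!C.contains k) = false by simp only [hc, Bool.not_true], Bool.false_or]
    simp
  · have hc' : C.contains k = false := (Bool.not_eq_true _) ▸ hc
    have hm : k ∉ C := by simpa using hc'
    have h0 : C.count k = 0 := List.count_eq_zero.mpr hm
    have hP : 0 < P.count k := List.count_pos_iff.mpr hk
    rw [show (!C.contains k) = true by simp only [hc', Bool.not_false], Bool.true_or]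
    have : P.count k ≠ C.count k := by omega
    simp [this]

theorem pvSolutionA_eq_find (P C : List String) :
    solution P C = (P.find? (pvQ P C)).getD "" := by
  show solutionLoopA (C.foldl (fun d c => d.modify c 0 (· + 1)) PySem.Dict.empty) ""
      (P.foldl (fun d p => d.modify p 0 (· + 1)) PySem.Dict.empty).items
    = (P.find? (pvQ P C)).getD ""
  rw [← PySem.Dict.counter_eq_foldl, ← PySem.Dict.counter_eq_foldl,
    pvLoopA_eq_find, PySem.Dict.items_counter, List.find?_map, pvFind?_ofList,
    pvFind?_congr_mem _ (pvQ P C) P (fun k hk => pvPred_agree P C k hk)]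
  cases h : P.find? (pvQ P C) with
  | none => rfl
  | some k => rfl

-- find? ignores the elements a (· != p)-filter removes when the predicate is false at p
theorem pvFind?_filter_ne (q : String → Bool) (p : String) (t : List String)
    (hp : q p = false) : (t.filter (fun x => x != p)).find? q = t.find? q := by
  induction t with
  | nil => rfl
  | cons y ys ih =>
    simp only [List.filter_cons]
    by_cases hyp : y = p
    · subst hyp
      rw [if_neg (by simp), ih, List.find?_cons_of_neg (by simp [hp])]
    · rw [if_pos (by simp [hyp])]
      cases hq : q y with
      | true => rw [List.find?_cons_of_pos hq, List.find?_cons_of_pos hq]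
      | false =>
        rw [List.find?_cons_of_neg (by simp [hq]), List.find?_cons_of_neg (by simp [hq]), ih]

-- counts of x ≠ p survive filtering p out
theorem pvCount_filter_ne (l : List String) (p x : String) (hx : x ≠ p) :
    (l.filter (fun y => y != p)).count x = l.count x := by
  induction l with
  | nil => rfl
  | cons y ys ih =>
    by_cases hyp : y = p
    · subst hyp
      simp only [List.filter_cons, bne_self_eq_false, if_neg (by simp : ¬(false = true)), ih]
      rw [List.count_cons]
      simp [Ne.symm hx]
    · simp only [List.filter_cons, if_pos (by simp [hyp] : (y != p) = true)]
      rw [List.count_cons, List.count_cons, ih]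

theorem pvCount_eq_filter_length (l : List String) (p : String) :
    (l.filter (fun x => x == p)).length = l.count p := by
  rw [List.count_eq_countP, List.countP_eq_length_filter]

theorem pvAlt_eq_find (P C : List String) :
    solution_alt P C = (P.find? (pvQ P C)).getD "" := by
  induction hn : P.length using Nat.strong_induction_on generalizing P C with
  | _ n ih =>
    match P with
    | [] => simp [solution_alt]
    | p :: t =>
      rw [solution_alt]
      have hcond : (((p :: t).filter (fun x => x == p)).length ≠ (C.filter (fun x => x == p)).length)
          ↔ (p :: t).count p ≠ C.count p := by
        rw [pvCount_eq_filter_length, pvCount_eq_filter_length]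
      by_cases hmis : (p :: t).count p ≠ C.count p
      · rw [if_pos (hcond.mpr hmis), List.find?_cons_of_pos (by simpa [pvQ] using hmis)]
        rfl
      · have heq : (p :: t).count p = C.count p := by omega
        have hqp : pvQ (p :: t) C p = false := by simp [pvQ, heq]
        rw [if_neg (fun h => hmis (hcond.mp h))]
        have hrestlen : ((p :: t).filter (fun x => x != p)).length < n := by
          subst hn
          simp only [List.filter_cons, bne_self_eq_false, List.length_cons]
          exact Nat.lt_succ_of_le (List.length_filter_le _ _)
        rw [ih _ hrestlen _ _ rfl]
        -- translate the recursive call's predicate back to pvQ (p::t) C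
        rw [pvFind?_congr_mem _ (pvQ (p :: t) C) _ (by
          intro x hx
          have hxp : x ≠ p := by
            have := List.of_mem_filter hx
            simpa using this
          simp only [pvQ]
          rw [pvCount_filter_ne _ _ _ hxp, pvCount_filter_ne _ _ _ hxp])]
        rw [pvFind?_filter_ne _ _ _ hqp, List.find?_cons_of_neg (by simp [hqp])]

-- ===== VERDICT (by name: the statement is the Claim_ definition above) =====
theorem solution_spec : Claim_equal_solution := by
  intro P C _
  unfold Spec_solution
  rw [pvSolutionA_eq_find, pvAlt_eq_find]
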